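-- pv_equiv track=rewrite | github.com/alexandraback/datacollection | solutions_5658068650033152_0/Python/trecouvr/C.py | solve
-- ===== SOURCE A (Python) =====
-- def solve(N,M,K):
--     if M < N:
--         N,M = M,N
--     if N in (1,2):
--         return K
--     if K <= 5:
--         return K
--     r = M*M+1
--     for n in range(3,N+1):
--         rr = (K // n) * 2 + (n-2) * 2
--         #log(rr)
--         r = min(r, rr)
--     return r
-- ===== SOURCE B (Python) =====
-- def solve(N, M, K):
--     if M < N:
--         N, M = M, N
--     if N in (1, 2) or K <= 5:
--         return K
--     r = M * M + 1
--     n = 3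
--     # iterate over blocks of constant q = K // n; within a block rr is minimized at its smallest n
--     while n <= N:
--         q = K // n
--         rr = 2 * q + 2 * (n - 2)
--         if rr < r:
--             r = rr
--         if q > 0:
--             n = min(N, K // q) + 1
--         else:
--             break  # q == 0 for all larger n, and rr only grows
--     return r
-- ===== Notes on version B (the rewrite author's own statement) =====
-- stated objective: faster
-- what changed: Instead of scanning every n in [3,N], B jumps between the O(sqrt(K)) blocks of constant quotient K//n, evaluating the cost only at the smallest n of each block (where it is minimal) and stopping once the quotient hits 0.
import Mathlib
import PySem

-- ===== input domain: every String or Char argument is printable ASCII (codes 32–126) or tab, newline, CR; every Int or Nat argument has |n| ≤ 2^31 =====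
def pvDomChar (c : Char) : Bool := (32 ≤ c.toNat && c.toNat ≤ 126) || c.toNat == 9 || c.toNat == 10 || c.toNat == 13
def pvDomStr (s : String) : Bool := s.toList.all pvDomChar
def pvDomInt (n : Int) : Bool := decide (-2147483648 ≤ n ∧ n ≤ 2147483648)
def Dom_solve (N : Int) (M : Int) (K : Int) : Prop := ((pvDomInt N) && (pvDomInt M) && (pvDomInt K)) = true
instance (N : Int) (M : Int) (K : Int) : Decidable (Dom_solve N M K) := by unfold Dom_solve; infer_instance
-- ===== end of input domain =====

-- B replaces A's linear scan of n ∈ [3,N] by a jump over the O(√K) blocks of constant K//n (objective: faster).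

-- ===== PORT A =====
def solve (N : Int) (M : Int) (K : Int) : Int :=
  let p := if M < N then (M, N) else (N, M)
  if p.1 = 1 ∨ p.1 = 2 then K
  else if K ≤ 5 then K
  else (PySem.List.pyRange 3 (p.1 + 1) 1).foldl
    (fun r n => min r (PySem.Int.floordiv K n * 2 + (n - 2) * 2)) (p.2 * p.2 + 1)

-- ===== PORT B =====
-- the `max (n+1) …` is a termination guard only: on every reachable state the jump
-- target min N (K//q) + 1 is already ≥ n+1 (proved in loop_eq below), so it is a no-op.
def solveAltLoop (N : Int) (K : Int) (n : Int) (r : Int) : Int :=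
  if h : n ≤ N then
    let q := PySem.Int.floordiv K n
    let rr := 2 * q + 2 * (n - 2)
    let r' := if rr < r then rr else r
    if 0 < q then solveAltLoop N K (max (n + 1) (min N (PySem.Int.floordiv K q) + 1)) r'
    else r'
  else r
termination_by (N + 1 - n).toNat
decreasing_by
  have hstep : n + 1 ≤ max (n + 1) (min N (PySem.Int.floordiv K q) + 1) := le_max_left _ _
  omega

def solve_alt (N : Int) (M : Int) (K : Int) : Int :=
  let p := if M < N then (M, N) else (N, M)
  if p.1 = 1 ∨ p.1 = 2 ∨ K ≤ 5 then K
  else solveAltLoop p.1 K 3 (p.2 * p.2 + 1)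

-- ===== PRECONDITION & SPEC =====
def Spec_solve (N : Int) (M : Int) (K : Int) (out : Int) : Prop := out = solve_alt N M K
instance (N : Int) (M : Int) (K : Int) (out : Int) : Decidable (Spec_solve N M K out) := by unfold Spec_solve; infer_instance

-- ===== CLAIM (what is proved, stated in full; the proofs are below) =====
def Claim_equal_solve : Prop := ∀ (N : Int) (M : Int) (K : Int), Dom_solve N M K → Spec_solve N M K (solve N M K)

-- ===== LEMMAS AND PROOFS =====

-- folding `min` absorbs elements that are all ≥ v
theorem foldl_min_absorb (g : Int → Int) (l : List Int) (r v : Int)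
    (h : ∀ m ∈ l, v ≤ g m) :
    l.foldl (fun r m => min r (g m)) (min r v) = min r v := by
  induction l with
  | nil => rfl
  | cons m t ih =>
    have hv : min r v ≤ g m := le_trans (min_le_right r v) (h m (List.mem_cons_self))
    simp only [List.foldl_cons]
    rw [min_eq_left hv]
    exact ih (fun x hx => h x (List.mem_cons_of_mem _ hx))

-- a fold of min over a nonempty range whose head is minimal collapses to one min
theorem fold_block (g : Int → Int) (a b r : Int) (hab : a < b)
    (h : ∀ m, a ≤ m → m < b → g a ≤ g m) :
    (PySem.List.pyRange a b 1).foldl (fun r m => min r (g m)) r = min r (g a) := by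
  rw [PySem.List.pyRange_one_cons hab]
  simp only [List.foldl_cons]
  exact foldl_min_absorb g _ r (g a) (fun m hm => by
    rw [PySem.List.mem_pyRange_one] at hm
    exact h m (by omega) hm.2)

-- divisor-block identity: for n ≤ m ≤ K//q with q = K//n > 0, K//m = q
theorem floordiv_block (K n m q : Int) (hn : 0 < n)
    (hq : PySem.Int.floordiv K n = q) (h1 : 0 < q)
    (hnm : n ≤ m) (hm : m ≤ PySem.Int.floordiv K q) :
    PySem.Int.floordiv K m = q := by
  have hm0 : 0 < m := lt_of_lt_of_le hn hnm
  have hb := (PySem.Int.floordiv_eq_iff_of_pos hn).mp hq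
  have hmq : m * q ≤ K := (PySem.Int.le_floordiv_iff_mul_le h1).mp hm
  have hlo : q ≤ PySem.Int.floordiv K m :=
    (PySem.Int.le_floordiv_iff_mul_le hm0).mpr (by nlinarith)
  have hhi : PySem.Int.floordiv K m < q + 1 :=
    (PySem.Int.floordiv_lt_iff_lt_mul hm0).mpr (by nlinarith)
  omega

theorem floordiv_zero_of_lt (K m : Int) (h0 : 0 ≤ K) (h : K < m) :
    PySem.Int.floordiv K m = 0 := by
  have hm : 0 < m := lt_of_le_of_lt h0 h
  exact (PySem.Int.floordiv_eq_iff_of_pos hm).mpr ⟨by omega, by omega⟩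

-- main loop invariant: B's block-jumping loop computes exactly A's fold over [n, N]
theorem loop_eq (N K : Int) (hK : 6 ≤ K) : ∀ (d : Nat) (n r : Int),
    (N + 1 - n).toNat = d → 3 ≤ n →
    solveAltLoop N K n r =
      (PySem.List.pyRange n (N + 1) 1).foldl
        (fun r m => min r (PySem.Int.floordiv K m * 2 + (m - 2) * 2)) r := by
  intro d
  induction d using Nat.strong_induction_on with
  | _ d ih =>
    intro n r hd hn
    rw [solveAltLoop]
    by_cases h : n ≤ N
    · simp only [dif_pos h]
      set q := PySem.Int.floordiv K n with hq0
      by_cases hq : 0 < q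
      · -- block with quotient q > 0 : collapse [n, min N (K//q)] then recurse
        rw [if_pos hq]
        have hn0 : (0:Int) < n := by omega
        have hqn := (PySem.Int.floordiv_eq_iff_of_pos hn0).mp hq0.symm
        have hKq : n ≤ PySem.Int.floordiv K q :=
          (PySem.Int.le_floordiv_iff_mul_le hq).mpr (by nlinarith)
        set e : Int := min N (PySem.Int.floordiv K q) + 1 with he
        have hne : n < e := by omega
        have hmax : max (n + 1) e = e := by omega
        rw [PySem.List.pyRange_one_append n e (N + 1) (by omega) (by omega), List.foldl_append]
        rw [fold_block _ n e r hne (fun m h1 h2 => by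
          have hm : PySem.Int.floordiv K m = q :=
            floordiv_block K n m q hn0 hq0.symm hq h1 (by omega)
          rw [hq0.symm, hm]
          omega)]
        have hlt : (N + 1 - max (n + 1) e).toNat < d := by omega
        rw [ih _ hlt _ _ rfl (by omega), hmax]
        congr 1
        omega
      · -- q = 0 : cost 2(m-2) only grows for m ≥ n; one min and stop
        rw [if_neg hq]
        have hn0 : (0:Int) < n := by omega
        have hqge : 0 ≤ q := hq0 ▸ (PySem.Int.le_floordiv_iff_mul_le hn0).mpr (by omega)
        have hqz : q = 0 := by omega
        have hKn : K < n := by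
          by_contra hc
          have : 1 ≤ q := hq0 ▸ (PySem.Int.le_floordiv_iff_mul_le hn0).mpr (by omega)
          omega
        rw [fold_block _ n (N + 1) r (by omega) (fun m h1 h2 => by
          rw [floordiv_zero_of_lt K m (by omega) (by omega),
              floordiv_zero_of_lt K n (by omega) hKn]
          omega)]
        rw [hqz]
        omega
    · simp only [dif_neg h]
      rw [PySem.List.pyRange_one_eq_nil (by omega)]
      rfl

-- ===== VERDICT (by name: the statement is the Claim_ definition above) =====
theorem solve_spec : Claim_equal_solve := by
  intro N M K _
  show solve N M K = solve_alt N M K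
  unfold solve solve_alt
  set p := if M < N then (M, N) else (N, M) with hp
  by_cases h12 : p.1 = 1 ∨ p.1 = 2
  · rw [if_pos h12, if_pos (by tauto)]
  · by_cases hK : K ≤ 5
    · rw [if_neg h12, if_pos hK, if_pos (by tauto)]
    · rw [if_neg h12, if_neg hK, if_neg (by tauto)]
      exact (loop_eq p.1 K (by omega) _ 3 (p.2 * p.2 + 1) rfl (by omega)).symm
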